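-- pv_equiv track=rewrite | github.com/90sidort/exercises_Python | sum_Consecutives.py | sum_consecutives
-- ===== SOURCE A (Python) =====
-- def sum_consecutives(s):
--     previous = None
--     result = []
--     for d in s:
--         if d == previous:
--             result[-1] += d
--         else:
--             result.append(d)
--         previous = d
--     return result
-- ===== SOURCE B (Python) =====
-- def sum_consecutives(s):
--     out = []
--     i, n = 0, len(s)
--     while i < n:
--         v = s[i]
--         j = i + 1
--         while j < n and s[j] == v:
--             j += 1
--         out.append(v * (j - i))
--         i = j
--     return out
-- ===== Notes on version B (the rewrite author's own statement) =====
-- stated objective: alternative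
-- what changed: B scans run boundaries with two index pointers and emits each run's sum as value*length in closed form, instead of A's element-wise sentinel state machine that repeatedly adds into the last element of the result list.
import Mathlib
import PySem

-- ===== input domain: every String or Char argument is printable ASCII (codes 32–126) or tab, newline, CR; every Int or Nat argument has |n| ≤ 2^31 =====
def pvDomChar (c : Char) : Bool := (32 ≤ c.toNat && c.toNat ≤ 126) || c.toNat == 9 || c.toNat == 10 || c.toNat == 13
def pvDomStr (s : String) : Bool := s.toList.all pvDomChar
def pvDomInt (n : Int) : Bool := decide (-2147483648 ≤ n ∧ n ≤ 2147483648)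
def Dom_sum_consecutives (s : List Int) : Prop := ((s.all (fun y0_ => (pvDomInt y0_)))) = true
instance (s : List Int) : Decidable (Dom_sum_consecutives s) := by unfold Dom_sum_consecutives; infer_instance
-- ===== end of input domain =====

-- B scans run boundaries with two index pointers and emits each run's sum as value*length in
-- closed form, replacing A's element-wise sentinel state machine that mutates the result's last element.

-- ===== PORT A =====
-- A's in-place increment of the result's last element (reachable only with a nonempty result)
def pvAddLast (res : List Int) (d : Int) : List Int :=
  match res with
  | [] => []
  | [a] => [a + d]
  | a :: b :: t => a :: pvAddLast (b :: t) d

def sum_consecutives (s : List Int) : List Int :=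
  (s.foldl (fun (st : Option Int × List Int) d =>
      if some d = st.1 then (some d, pvAddLast st.2 d)
      else (some d, st.2 ++ [d])) (none, [])).2

-- ===== PORT B =====
-- inner while: advance j past elements equal to v
def pvScan (s : List Int) (v : Int) (j : Nat) : Nat :=
  if h : j < s.length then
    if s[j] = v then pvScan s v (j + 1) else j
  else j
termination_by s.length - j

theorem pvScan_ge (s : List Int) (v : Int) (j : Nat) : j ≤ pvScan s v j := by
  unfold pvScan
  split
  · split
    · have := pvScan_ge s v (j + 1)
      omega
    · exact le_refl j
  · exact le_refl j
termination_by s.length - j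

-- outer while over i, appending v * (j - i) for each run [i, j)
def pvOuter (s : List Int) (out : List Int) (i : Nat) : List Int :=
  if h : i < s.length then
    let v := s[i]
    let j := pvScan s v (i + 1)
    pvOuter s (out ++ [v * ((j : Int) - (i : Int))]) j
  else out
termination_by s.length - i
decreasing_by
  have := pvScan_ge s s[i] (i + 1)
  omega

def sum_consecutives_alt (s : List Int) : List Int := pvOuter s [] 0

-- ===== PRECONDITION & SPEC =====
def Spec_sum_consecutives (s : List Int) (out : List Int) : Prop := out = sum_consecutives_alt s
instance (s : List Int) (out : List Int) : Decidable (Spec_sum_consecutives s out) := by unfold Spec_sum_consecutives; infer_instance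

-- ===== CLAIM (what is proved, stated in full; the proofs are below) =====
def Claim_equal_sum_consecutives : Prop := ∀ (s : List Int), Dom_sum_consecutives s → Spec_sum_consecutives s (sum_consecutives s)

-- ===== LEMMAS AND PROOFS =====
-- proof-side characterisation: length of the leading run of xs equal to v
def pvRunLen (v : Int) : List Int → Nat
  | [] => 0
  | y :: ys => if y = v then pvRunLen v ys + 1 else 0

theorem pvRunLen_le (v : Int) (xs : List Int) : pvRunLen v xs ≤ xs.length := by
  induction xs with
  | nil => simp [pvRunLen]
  | cons y ys ih => simp only [pvRunLen, List.length_cons]; split <;> omega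

-- proof-side run decomposition: the list of run sums, recursively on runs
def pvRuns (s : List Int) : List Int :=
  match s with
  | [] => []
  | x :: xs =>
    let k := pvRunLen x xs
    (x * (1 + (k : Int))) :: pvRuns (xs.drop k)
termination_by s.length
decreasing_by
  have := pvRunLen_le x xs
  simp only [List.length_drop, List.length_cons]
  omega

theorem pvAddLast_append (out : List Int) (acc d : Int) :
    pvAddLast (out ++ [acc]) d = out ++ [acc + d] := by
  induction out with
  | nil => rfl
  | cons a t ih =>
    cases t with
    | nil => simp [pvAddLast]
    | cons b u => simpa [pvAddLast] using ih

-- invariant of A's fold: from state (some key, out ++ [acc]) it finishes the current run and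
-- then produces pvRuns of the rest
theorem foldl_A_runs (xs : List Int) (out : List Int) (key acc : Int) :
    (xs.foldl (fun (st : Option Int × List Int) d =>
        if some d = st.1 then (some d, pvAddLast st.2 d)
        else (some d, st.2 ++ [d])) (some key, out ++ [acc])).2
    = out ++ [acc + key * (pvRunLen key xs : Int)]
        ++ pvRuns (xs.drop (pvRunLen key xs)) := by
  induction xs generalizing out key acc with
  | nil => simp [pvRuns]
  | cons y ys ih =>
    by_cases h : y = key
    · subst h
      have e1 : pvRunLen y (y :: ys) = pvRunLen y ys + 1 := by simp [pvRunLen]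
      rw [e1]
      simp only [List.foldl_cons, List.drop_succ_cons, if_true]
      rw [pvAddLast_append, ih out y (acc + y)]
      have e2 : acc + y + y * (pvRunLen y ys : Int)
          = acc + y * ((pvRunLen y ys + 1 : Nat) : Int) := by push_cast; ring
      rw [e2]
    · have h' : ¬ (some y = some key) := by simpa using h
      have e1 : pvRunLen key (y :: ys) = 0 := by simp [pvRunLen, h]
      rw [e1]
      simp only [Nat.cast_zero, mul_zero, add_zero, List.drop_zero, List.foldl_cons]
      rw [if_neg h', ih (out ++ [acc]) y y]
      conv_rhs => rw [pvRuns]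
      have e2 : (y : Int) + y * (pvRunLen y ys : Int)
          = y * (1 + (pvRunLen y ys : Int)) := by ring
      simp [e2]

-- pvScan counts exactly the leading run of the suffix
theorem pvScan_runLen (s : List Int) (v : Int) (j : Nat) :
    pvScan s v j = j + pvRunLen v (s.drop j) := by
  unfold pvScan
  split
  · rename_i h
    rw [List.drop_eq_getElem_cons h]
    split
    · rename_i he
      rw [pvScan_runLen s v (j + 1)]
      simp [pvRunLen, he]
      omega
    · rename_i he
      simp [pvRunLen, he]
  · rename_i h
    have : s.drop j = [] := List.drop_eq_nil_of_le (by omega)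
    simp [this, pvRunLen]
termination_by s.length - j

-- the outer loop computes out ++ pvRuns of the remaining suffix
theorem pvOuter_runs (s : List Int) (out : List Int) (i : Nat) :
    pvOuter s out i = out ++ pvRuns (s.drop i) := by
  unfold pvOuter
  split
  · rename_i h
    dsimp only
    rw [pvScan_runLen s s[i] (i + 1)]
    rw [pvOuter_runs s _ (i + 1 + pvRunLen s[i] (s.drop (i + 1)))]
    conv_rhs => rw [List.drop_eq_getElem_cons h, pvRuns]
    have e1 : s.drop (i + 1 + pvRunLen s[i] (s.drop (i + 1)))
        = (s.drop (i + 1)).drop (pvRunLen s[i] (s.drop (i + 1))) := by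
      rw [List.drop_drop]
    have e2 : ((i + 1 + pvRunLen s[i] (s.drop (i + 1)) : Nat) : Int) - (i : Nat)
        = 1 + (pvRunLen s[i] (s.drop (i + 1)) : Int) := by omega
    simp only [e1, e2, List.append_assoc, List.singleton_append]
  · have h2 : s.drop i = [] := List.drop_eq_nil_of_le (by omega)
    simp [h2, pvRuns]
termination_by s.length - i
decreasing_by
  have := pvRunLen_le s[i] (s.drop (i + 1))
  simp only [List.length_drop] at this
  omega

-- ===== VERDICT (by name: the statement is the Claim_ definition above) =====
theorem sum_consecutives_spec : Claim_equal_sum_consecutives := by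
  intro s _
  unfold Spec_sum_consecutives sum_consecutives sum_consecutives_alt
  rw [pvOuter_runs, List.drop_zero, List.nil_append]
  cases s with
  | nil => simp [pvRuns]
  | cons x xs =>
    simp only [List.foldl_cons, List.nil_append]
    rw [if_neg (by simp : ¬ (some x = (none : Option Int)))]
    have h := foldl_A_runs xs [] x x
    simp only [List.nil_append] at h
    rw [h]
    have e2 : (x : Int) + x * (pvRunLen x xs : Int)
        = x * (1 + (pvRunLen x xs : Int)) := by ring
    simp [pvRuns, e2]
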